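-- pv_equiv track=rewrite | github.com/mtklein/asspodgame | tools/bake_tileset.py | pack_tiles
-- ===== SOURCE A (Python) =====
-- def match_pixel(r, g, b, a, palette_rgb8, cache):
--     """Return the palette index closest to (r, g, b, a).
--
--     Transparent pixels (alpha == 0) always map to index 0.
--     """
--     if a == 0:
--         return 0
--     key = (r, g, b)
--     if key in cache:
--         return cache[key]
--     best_idx = 0
--     best_dist = float("inf")
--     for idx, (pr, pg, pb) in enumerate(palette_rgb8):
--         dr = r - pr
--         dg = g - pg
--         db = b - pb
--         dist = dr * dr + dg * dg + db * db
--         if dist < best_dist: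
--             best_dist = dist
--             best_idx = idx
--             if dist == 0:
--                 break
--     cache[key] = best_idx
--     return best_idx
--
-- def pack_tiles(width, height, pixels, palette_rgb8):
--     """Pack pixel data into GBA 4bpp tile words.
--
--     The image is treated as an 8-column grid of 8x8 tiles.  Returns a flat
--     list of u32 words (8 words per tile, tiles in row-major order).
--     """
--     tiles_x = 8
--     tiles_y = height // 8
--     num_tiles = tiles_x * tiles_y
--
--     cache = {}
--     words = []
--
--     for t in range(num_tiles):
--         tx = t % tiles_x
--         ty = t // tiles_x
--         for row in range(8):
--             word = 0
--             for col in range(8):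
--                 px = tx * 8 + col
--                 py = ty * 8 + row
--                 r, g, b, a = pixels[py * width + px]
--                 idx = match_pixel(r, g, b, a, palette_rgb8, cache)
--                 word |= (idx & 0xF) << (col * 4)
--             words.append(word)
--
--     return words, num_tiles
-- ===== SOURCE B (Python) =====
-- def _nearest(r, g, b, palette_rgb8):
--     return min(range(len(palette_rgb8)),
--                key=lambda i: (r - palette_rgb8[i][0]) ** 2
--                            + (g - palette_rgb8[i][1]) ** 2
--                            + (b - palette_rgb8[i][2]) ** 2,
--                default=0)
--
-- def pack_tiles(width, height, pixels, palette_rgb8):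
--     tiles_y = height // 8
--     num_tiles = 8 * tiles_y
--
--     # Pass 1: palette index for every pixel of the tile region, row by row.
--     cache = {}
--     grid = []
--     for py in range(8 * tiles_y):
--         row_idx = []
--         for px in range(64):
--             r, g, b, a = pixels[py * width + px]
--             if a == 0:
--                 idx = 0
--             else:
--                 key = (r, g, b)
--                 if key not in cache:
--                     cache[key] = _nearest(r, g, b, palette_rgb8)
--                 idx = cache[key]
--             row_idx.append(idx)
--         grid.append(row_idx)
--
--     # Pass 2: pack precomputed indices into 32-bit words, tile by tile.
--     words = []
--     for t in range(num_tiles):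
--         tx = t % 8
--         ty = t // 8
--         for row in range(8):
--             line = grid[ty * 8 + row]
--             word = 0
--             for col in range(8):
--                 word |= (line[tx * 8 + col] & 0xF) << (col * 4)
--             words.append(word)
--     return words, num_tiles
-- ===== Notes on version B (the rewrite author's own statement) =====
-- stated objective: alternative
-- what changed: B replaces A's single cache-threaded triple loop (tile, row, col with inline nearest-palette scan keeping best/best_dist with an early break) by two passes: pass 1 builds a row-major grid of palette indices over the tile region, computing each index with min(range(len(palette)), key=distance, default=0); pass 2 packs words tile-by-tile by pure reads of the precomputed grid.
import Mathlib
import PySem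

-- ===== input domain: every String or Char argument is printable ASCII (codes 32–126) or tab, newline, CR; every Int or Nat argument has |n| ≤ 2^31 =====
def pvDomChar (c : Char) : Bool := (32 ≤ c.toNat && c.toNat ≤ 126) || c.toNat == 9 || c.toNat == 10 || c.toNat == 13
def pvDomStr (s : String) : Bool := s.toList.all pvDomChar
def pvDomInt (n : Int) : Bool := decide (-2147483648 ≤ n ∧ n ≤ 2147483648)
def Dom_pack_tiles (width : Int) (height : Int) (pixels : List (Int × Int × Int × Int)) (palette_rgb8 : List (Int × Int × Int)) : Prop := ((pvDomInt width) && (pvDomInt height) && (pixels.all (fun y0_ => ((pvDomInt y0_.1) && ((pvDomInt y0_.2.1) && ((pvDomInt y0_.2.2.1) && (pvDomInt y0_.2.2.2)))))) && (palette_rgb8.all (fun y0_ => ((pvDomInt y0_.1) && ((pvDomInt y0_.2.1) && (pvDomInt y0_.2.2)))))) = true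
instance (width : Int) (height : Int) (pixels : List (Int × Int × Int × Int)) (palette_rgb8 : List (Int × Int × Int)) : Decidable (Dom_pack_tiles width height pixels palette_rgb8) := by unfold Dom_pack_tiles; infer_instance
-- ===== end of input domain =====

-- B repacks the same GBA 4bpp tile data in two passes (precomputed index grid, then pure word
-- assembly) with min(..., key=..., default=0) for the nearest palette entry, instead of A's single
-- cache-threaded triple loop with an inline best/best_dist scan; same return value, no speed claim.


-- ===== PORT A =====
-- best_dist starts at float("inf"); since all candidate distances are Ints we model it as
-- Option Int with none = inf (exact: dist < inf is always true, and best_dist is otherwise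
-- always one of the integer distances).
def ltOpt (dist : Int) : Option Int → Bool
  | none => true
  | some d => decide (dist < d)

-- A's 'for idx, (pr, pg, pb) in enumerate(palette_rgb8)' loop, with the 'break' on dist == 0.
def matchLoop (r g b : Int) : List (Int × (Int × Int × Int)) → Int → Option Int → Int
  | [], best, _ => best
  | (idx, e) :: rest, best, bestDist =>
    let dist := (r - e.1) * (r - e.1) + (g - e.2.1) * (g - e.2.1) + (b - e.2.2) * (b - e.2.2)
    if ltOpt dist bestDist then
      if dist = 0 then idx
      else matchLoop r g b rest idx (some dist)
    else matchLoop r g b rest best bestDist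

def match_pixel (r g b a : Int) (palette_rgb8 : List (Int × Int × Int))
    (cache : PySem.Dict (Int × Int × Int) Int) : Int × PySem.Dict (Int × Int × Int) Int :=
  if a = 0 then (0, cache)
  else
    match cache.get? (r, g, b) with
    | some v => (v, cache)
    | none =>
      let best := matchLoop r g b (PySem.List.enumerate palette_rgb8) 0 none
      (best, cache.insert (r, g, b) best)

-- the body of A's 'for col in range(8)' loop (state: cache, word)
def packColStepA (width : Int) (pixels : List (Int × Int × Int × Int))
    (palette_rgb8 : List (Int × Int × Int)) (tx ty row : Int)
    (cw : PySem.Dict (Int × Int × Int) Int × Int) (col : Int) :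
    PySem.Dict (Int × Int × Int) Int × Int :=
  let px := tx * 8 + col
  let py := ty * 8 + row
  let p := (PySem.List.pyGet? pixels (py * width + px)).getD (0, 0, 0, 0)  -- IndexError excluded by Pre_
  let res := match_pixel p.1 p.2.1 p.2.2.1 p.2.2.2 palette_rgb8 cw.1
  (res.2, PySem.Int.bor cw.2 ((PySem.Int.band res.1 15) <<< (col * 4).toNat))

-- the body of A's 'for row in range(8)' loop (state: cache, words)
def packRowStepA (width : Int) (pixels : List (Int × Int × Int × Int))
    (palette_rgb8 : List (Int × Int × Int)) (tx ty : Int)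
    (st : PySem.Dict (Int × Int × Int) Int × List Int) (row : Int) :
    PySem.Dict (Int × Int × Int) Int × List Int :=
  let inner := (PySem.List.pyRange 0 8).foldl (packColStepA width pixels palette_rgb8 tx ty row) (st.1, 0)
  (inner.1, st.2 ++ [inner.2])

-- the body of A's 'for t in range(num_tiles)' loop
def packTileStepA (width : Int) (pixels : List (Int × Int × Int × Int))
    (palette_rgb8 : List (Int × Int × Int))
    (st : PySem.Dict (Int × Int × Int) Int × List Int) (t : Int) :
    PySem.Dict (Int × Int × Int) Int × List Int :=
  let tx := PySem.Int.mod t 8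
  let ty := PySem.Int.floordiv t 8
  (PySem.List.pyRange 0 8).foldl (packRowStepA width pixels palette_rgb8 tx ty) st

def pack_tiles (width : Int) (height : Int) (pixels : List (Int × Int × Int × Int)) (palette_rgb8 : List (Int × Int × Int)) : List Int × Int :=
  let tiles_y := PySem.Int.floordiv height 8
  let num_tiles := 8 * tiles_y
  let res := (PySem.List.pyRange 0 num_tiles).foldl (packTileStepA width pixels palette_rgb8)
    (PySem.Dict.empty, [])
  (res.2, num_tiles)

-- ===== PORT B =====
-- B's _nearest: min(range(len(palette)), key=squared distance, default=0)
def nearest (r g b : Int) (palette_rgb8 : List (Int × Int × Int)) : Int :=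
  PySem.List.minD (PySem.List.pyRange 0 (PySem.List.len palette_rgb8))
    (fun i =>
      let p := (PySem.List.pyGet? palette_rgb8 i).getD (0, 0, 0)
      (r - p.1) ^ 2 + (g - p.2.1) ^ 2 + (b - p.2.2) ^ 2)
    0

-- pass 1, body of 'for px in range(64)' (state: cache, row_idx)
def gridPxStepB (width : Int) (pixels : List (Int × Int × Int × Int))
    (palette_rgb8 : List (Int × Int × Int)) (py : Int)
    (st : PySem.Dict (Int × Int × Int) Int × List Int) (px : Int) :
    PySem.Dict (Int × Int × Int) Int × List Int :=
  let p := (PySem.List.pyGet? pixels (py * width + px)).getD (0, 0, 0, 0)  -- IndexError excluded by Pre_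
  if p.2.2.2 = 0 then (st.1, st.2 ++ [0])
  else
    let key := (p.1, p.2.1, p.2.2.1)
    let cache := if st.1.contains key then st.1
                 else st.1.insert key (nearest p.1 p.2.1 p.2.2.1 palette_rgb8)
    (cache, st.2 ++ [cache.getD key 0])

-- pass 1, body of 'for py in range(8 * tiles_y)' (state: cache, grid)
def gridRowStepB (width : Int) (pixels : List (Int × Int × Int × Int))
    (palette_rgb8 : List (Int × Int × Int))
    (st : PySem.Dict (Int × Int × Int) Int × List (List Int)) (py : Int) :
    PySem.Dict (Int × Int × Int) Int × List (List Int) :=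
  let rowRes := (PySem.List.pyRange 0 64).foldl (gridPxStepB width pixels palette_rgb8 py) (st.1, [])
  (rowRes.1, st.2 ++ [rowRes.2])

-- pass 2, word for one (t, row) read off the grid
def wordB (grid : List (List Int)) (t row : Int) : Int :=
  let tx := PySem.Int.mod t 8
  let ty := PySem.Int.floordiv t 8
  let line := (PySem.List.pyGet? grid (ty * 8 + row)).getD []
  (PySem.List.pyRange 0 8).foldl (fun w col =>
    PySem.Int.bor w ((PySem.Int.band ((PySem.List.pyGet? line (tx * 8 + col)).getD 0) 15) <<< (col * 4).toNat)) 0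

def pack_tiles_alt (width : Int) (height : Int) (pixels : List (Int × Int × Int × Int)) (palette_rgb8 : List (Int × Int × Int)) : List Int × Int :=
  let tiles_y := PySem.Int.floordiv height 8
  let num_tiles := 8 * tiles_y
  let pass1 := (PySem.List.pyRange 0 (8 * tiles_y)).foldl (gridRowStepB width pixels palette_rgb8)
    (PySem.Dict.empty, [])
  let grid := pass1.2
  let words := (PySem.List.pyRange 0 num_tiles).foldl (fun ws t =>
    (PySem.List.pyRange 0 8).foldl (fun ws row => ws ++ [wordB grid t row]) ws) []
  (words, num_tiles)

-- ===== PRECONDITION & SPEC =====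
-- Pre_ excludes exactly the inputs where A raises IndexError: some pixel index py*width+px read
-- by the tile region (0 <= py < m := 8*(height//8), 0 <= px < 64) is out of range for the pixels
-- list.  The accessed indices are linear in (py, px) and the in-range condition is an interval,
-- so all accesses are in range iff the four corner indices are (or the region is empty).
def Pre_pack_tiles (width : Int) (height : Int) (pixels : List (Int × Int × Int × Int)) (_palette_rgb8 : List (Int × Int × Int)) : Prop :=
  8 * PySem.Int.floordiv height 8 ≤ 0 ∨
    (PySem.Raise.InRange pixels.length 0 ∧
     PySem.Raise.InRange pixels.length 63 ∧
     PySem.Raise.InRange pixels.length ((8 * PySem.Int.floordiv height 8 - 1) * width) ∧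
     PySem.Raise.InRange pixels.length ((8 * PySem.Int.floordiv height 8 - 1) * width + 63))
instance (width : Int) (height : Int) (pixels : List (Int × Int × Int × Int)) (palette_rgb8 : List (Int × Int × Int)) : Decidable (Pre_pack_tiles width height pixels palette_rgb8) := by unfold Pre_pack_tiles; infer_instance

def pvWitness_pack_tiles : Int × Int × (List (Int × Int × Int × Int)) × (List (Int × Int × Int)) :=
  (0, 8, List.replicate 64 (10, 20, 30, 255), [(0, 0, 0), (10, 20, 30)])

def Spec_pack_tiles (width : Int) (height : Int) (pixels : List (Int × Int × Int × Int)) (palette_rgb8 : List (Int × Int × Int)) (out : List Int × Int) : Prop := out = pack_tiles_alt width height pixels palette_rgb8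
instance (width : Int) (height : Int) (pixels : List (Int × Int × Int × Int)) (palette_rgb8 : List (Int × Int × Int)) (out : List Int × Int) : Decidable (Spec_pack_tiles width height pixels palette_rgb8 out) := by unfold Spec_pack_tiles; infer_instance

-- ===== CLAIM (what is proved, stated in full; the proofs are below) =====
def Claim_equal_pack_tiles : Prop := ∀ (width : Int) (height : Int) (pixels : List (Int × Int × Int × Int)) (palette_rgb8 : List (Int × Int × Int)), Dom_pack_tiles width height pixels palette_rgb8 → Pre_pack_tiles width height pixels palette_rgb8 → Spec_pack_tiles width height pixels palette_rgb8 (pack_tiles width height pixels palette_rgb8)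

-- ===== LEMMAS AND PROOFS =====

-- squared distance to a palette entry
def distE (r g b : Int) (e : Int × Int × Int) : Int :=
  (r - e.1) * (r - e.1) + (g - e.2.1) * (g - e.2.1) + (b - e.2.2) * (b - e.2.2)

-- common first-argmin spec of A's scan and B's min(..., key=...)
def fm (r g b : Int) : List (Int × Int × Int) → Int → Int → Option Int → Int
  | [], _, best, _ => best
  | e :: rest, k, best, bd =>
    if ltOpt (distE r g b e) bd then fm r g b rest (k + 1) k (some (distE r g b e))
    else fm r g b rest (k + 1) best bd

def pIdx (r g b a : Int) (palette_rgb8 : List (Int × Int × Int)) : Int :=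
  if a = 0 then 0 else nearest r g b palette_rgb8

def idxAt (width : Int) (pixels : List (Int × Int × Int × Int))
    (palette_rgb8 : List (Int × Int × Int)) (py px : Int) : Int :=
  let p := (PySem.List.pyGet? pixels (py * width + px)).getD (0, 0, 0, 0)
  pIdx p.1 p.2.1 p.2.2.1 p.2.2.2 palette_rgb8

def pureW (width : Int) (pixels : List (Int × Int × Int × Int))
    (palette_rgb8 : List (Int × Int × Int)) (tx ty row : Int) : Int :=
  (PySem.List.pyRange 0 8).foldl (fun w col =>
    PySem.Int.bor w ((PySem.Int.band (idxAt width pixels palette_rgb8 (ty * 8 + row) (tx * 8 + col)) 15) <<< (col * 4).toNat)) 0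

def CacheOK (palette_rgb8 : List (Int × Int × Int)) (cache : PySem.Dict (Int × Int × Int) Int) : Prop :=
  ∀ k v, cache.get? k = some v → v = nearest k.1 k.2.1 k.2.2 palette_rgb8

lemma fm_some_zero (r g b : Int) (l : List (Int × Int × Int)) :
    ∀ (k best : Int), fm r g b l k best (some 0) = best := by
  induction l with
  | nil => intro k best; rfl
  | cons e rest ih =>
    intro k best
    have h0 : 0 ≤ distE r g b e := by
      have := mul_self_nonneg (r - e.1)
      have := mul_self_nonneg (g - e.2.1)
      have := mul_self_nonneg (b - e.2.2)
      unfold distE; omega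
    simp only [fm, ltOpt]
    have : ¬ (distE r g b e < 0) := by omega
    simp [this, ih]

lemma matchLoop_eq_fm (r g b : Int) (l : List (Int × Int × Int)) :
    ∀ (k best : Int) (bd : Option Int),
      matchLoop r g b (PySem.List.enumerate l k) best bd = fm r g b l k best bd := by
  induction l with
  | nil => intro k best bd; rfl
  | cons e rest ih =>
    intro k best bd
    have hd : (r - e.1) * (r - e.1) + (g - e.2.1) * (g - e.2.1) + (b - e.2.2) * (b - e.2.2)
        = distE r g b e := rfl
    simp only [PySem.List.enumerate, matchLoop, fm, hd]
    by_cases hlt : ltOpt (distE r g b e) bd = true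
    · simp only [hlt, if_true]
      by_cases h0 : distE r g b e = 0
      · simp only [h0, ite_true]
        rw [fm_some_zero]
      · simp only [h0, ite_false]
        exact ih (k + 1) k (some _)
    · simp only [hlt, Bool.false_eq_true, ite_false]
      exact ih (k + 1) best bd

-- B's key function, and its value at an in-range index
def keyB (r g b : Int) (pal : List (Int × Int × Int)) : Int → Int :=
  fun i =>
    let p := (PySem.List.pyGet? pal i).getD (0, 0, 0)
    (r - p.1) ^ 2 + (g - p.2.1) ^ 2 + (b - p.2.2) ^ 2

lemma keyB_eq_distE (r g b : Int) (pal : List (Int × Int × Int)) (i : Int)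
    (h0 : 0 ≤ i) (hl : i.toNat < pal.length) :
    keyB r g b pal i = distE r g b pal[i.toNat] := by
  simp only [keyB]
  rw [PySem.List.pyGet?_of_nonneg pal h0]
  simp [List.getElem?_eq_getElem hl, distE]; ring

-- one step of Python's min: fold the first two candidates into one
lemma min?_cons_cons (key : Int → Int) (a b : Int) (l : List Int) :
    PySem.List.min? (a :: b :: l) key
      = PySem.List.min? ((if key b < key a then b else a) :: l) key := by
  simp only [PySem.List.min?, List.foldl_cons]
  by_cases h : key b < key a
  · simp [h]
  · simp [h]

-- B's min(range(len(pal)), key=keyB) equals the first-argmin spec, by suffix induction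
lemma minfold_eq_fm (r g b : Int) (pal : List (Int × Int × Int)) :
    ∀ (l : List (Int × Int × Int)) (k : Int), 0 ≤ k → pal.drop k.toNat = l →
      ((PySem.List.min? (PySem.List.pyRange k ((pal.length : Int))) (keyB r g b pal)).getD 0
        = fm r g b l k 0 none)
      ∧ ∀ best : Int,
        ((PySem.List.min? (best :: PySem.List.pyRange k ((pal.length : Int))) (keyB r g b pal)).getD 0
        = fm r g b l k best (some (keyB r g b pal best))) := by
  intro l
  induction l with
  | nil =>
    intro k hk hd
    have hlen : pal.length ≤ k.toNat := by
      simpa using List.drop_eq_nil_iff.mp hd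
    have hr : PySem.List.pyRange k ((pal.length : Int)) = [] :=
      PySem.List.pyRange_one_eq_nil (by omega)
    refine ⟨?_, ?_⟩ <;> simp [hr, fm, PySem.List.min?]
  | cons e rest ih =>
    intro k hk hd
    have hkl : k.toNat < pal.length := by
      by_contra hge
      rw [List.drop_eq_nil_iff.mpr (by omega)] at hd
      simp at hd
    have hdrop := List.drop_eq_getElem_cons hkl
    rw [hd] at hdrop
    obtain ⟨he, hres⟩ := List.cons.inj hdrop
    have hrest : pal.drop (k + 1).toNat = rest := by
      have : (k + 1).toNat = k.toNat + 1 := by omega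
      rw [this, hres]
    have hcons : PySem.List.pyRange k ((pal.length : Int))
        = k :: PySem.List.pyRange (k + 1) ((pal.length : Int)) :=
      PySem.List.pyRange_one_cons (by omega)
    have hkey : keyB r g b pal k = distE r g b e := by
      rw [keyB_eq_distE r g b pal k hk hkl, ← he]
    obtain ⟨ih1, ih2⟩ := ih (k + 1) (by omega) hrest
    constructor
    · rw [hcons]
      have := ih2 k
      rw [hkey] at this
      rw [show (fm r g b (e :: rest) k 0 none) = fm r g b rest (k + 1) k (some (distE r g b e)) by
        simp [fm, ltOpt]]
      exact this
    · intro best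
      rw [hcons, min?_cons_cons]
      by_cases hc : keyB r g b pal k < keyB r g b pal best
      · rw [if_pos hc]
        have := ih2 k
        rw [hkey] at this
        rw [show fm r g b (e :: rest) k best (some (keyB r g b pal best))
            = fm r g b rest (k + 1) k (some (distE r g b e)) by
          simp only [fm, ltOpt]
          rw [← hkey]
          simp [hc]]
        exact this
      · rw [if_neg hc]
        have := ih2 best
        rw [show fm r g b (e :: rest) k best (some (keyB r g b pal best))
            = fm r g b rest (k + 1) best (some (keyB r g b pal best)) by
          simp only [fm, ltOpt]
          rw [← hkey]
          simp [hc]]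
        exact this

lemma nearest_eq_fm (r g b : Int) (pal : List (Int × Int × Int)) :
    nearest r g b pal = fm r g b pal 0 0 none := by
  have h := (minfold_eq_fm r g b pal pal 0 le_rfl (by simp)).1
  simp only [nearest, PySem.List.minD, PySem.List.len_eq] at h ⊢
  exact h

-- A's match_pixel under a correct cache: returns the pure index, keeps the cache correct
lemma match_pixel_spec (r g b a : Int) (pal : List (Int × Int × Int))
    (cache : PySem.Dict (Int × Int × Int) Int) (h : CacheOK pal cache) :
    (match_pixel r g b a pal cache).1 = pIdx r g b a pal ∧ CacheOK pal (match_pixel r g b a pal cache).2 := by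
  unfold match_pixel pIdx
  by_cases ha : a = 0
  · simpa [ha] using h
  · simp only [ha, ite_false]
    cases hc : cache.get? (r, g, b) with
    | some v =>
      exact ⟨(h (r, g, b) v hc), h⟩
    | none =>
      refine ⟨?_, ?_⟩
      · rw [matchLoop_eq_fm, ← nearest_eq_fm]
      · intro k v hkv
        rw [PySem.Dict.get?_insert] at hkv
        by_cases hk : k = (r, g, b)
        · simp only [hk, if_pos] at hkv
          obtain rfl : matchLoop r g b (PySem.List.enumerate pal) 0 none = v := Option.some.inj hkv
          rw [matchLoop_eq_fm, ← nearest_eq_fm, hk]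
        · rw [if_neg hk] at hkv
          exact h k v hkv

-- A's col loop
lemma colA_spec (width : Int) (pixels : List (Int × Int × Int × Int))
    (pal : List (Int × Int × Int)) (tx ty row : Int) (cols : List Int) :
    ∀ (cache : PySem.Dict (Int × Int × Int) Int) (w : Int), CacheOK pal cache →
      (cols.foldl (packColStepA width pixels pal tx ty row) (cache, w)).2
        = cols.foldl (fun w col =>
            PySem.Int.bor w ((PySem.Int.band (idxAt width pixels pal (ty * 8 + row) (tx * 8 + col)) 15) <<< (col * 4).toNat)) w
      ∧ CacheOK pal (cols.foldl (packColStepA width pixels pal tx ty row) (cache, w)).1 := by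
  induction cols with
  | nil => intro cache w h; exact ⟨rfl, h⟩
  | cons c cs ih =>
    intro cache w h
    simp only [List.foldl_cons]
    obtain ⟨h1, h2⟩ := match_pixel_spec
      ((PySem.List.pyGet? pixels ((ty * 8 + row) * width + (tx * 8 + c))).getD (0, 0, 0, 0)).1
      ((PySem.List.pyGet? pixels ((ty * 8 + row) * width + (tx * 8 + c))).getD (0, 0, 0, 0)).2.1
      ((PySem.List.pyGet? pixels ((ty * 8 + row) * width + (tx * 8 + c))).getD (0, 0, 0, 0)).2.2.1
      ((PySem.List.pyGet? pixels ((ty * 8 + row) * width + (tx * 8 + c))).getD (0, 0, 0, 0)).2.2.2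
      pal cache h
    have hstep : packColStepA width pixels pal tx ty row (cache, w) c
        = ((match_pixel
             ((PySem.List.pyGet? pixels ((ty * 8 + row) * width + (tx * 8 + c))).getD (0, 0, 0, 0)).1
             ((PySem.List.pyGet? pixels ((ty * 8 + row) * width + (tx * 8 + c))).getD (0, 0, 0, 0)).2.1
             ((PySem.List.pyGet? pixels ((ty * 8 + row) * width + (tx * 8 + c))).getD (0, 0, 0, 0)).2.2.1
             ((PySem.List.pyGet? pixels ((ty * 8 + row) * width + (tx * 8 + c))).getD (0, 0, 0, 0)).2.2.2
             pal cache).2,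
           PySem.Int.bor w ((PySem.Int.band (idxAt width pixels pal (ty * 8 + row) (tx * 8 + c)) 15) <<< ((c * 4).toNat))) := by
      simp only [packColStepA, idxAt]
      rw [h1]
    rw [hstep]
    exact ih _ _ h2

-- A's row loop
lemma rowA_spec (width : Int) (pixels : List (Int × Int × Int × Int))
    (pal : List (Int × Int × Int)) (tx ty : Int) (rows : List Int) :
    ∀ (st : PySem.Dict (Int × Int × Int) Int × List Int), CacheOK pal st.1 →
      (rows.foldl (packRowStepA width pixels pal tx ty) st).2
        = st.2 ++ rows.map (pureW width pixels pal tx ty)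
      ∧ CacheOK pal (rows.foldl (packRowStepA width pixels pal tx ty) st).1 := by
  induction rows with
  | nil => intro st h; simpa using h
  | cons row rs ih =>
    intro st h
    simp only [List.foldl_cons]
    obtain ⟨c1, c2⟩ := colA_spec width pixels pal tx ty row (PySem.List.pyRange 0 8) st.1 0 h
    have hstep : packRowStepA width pixels pal tx ty st row
        = (((PySem.List.pyRange 0 8).foldl (packColStepA width pixels pal tx ty row) (st.1, 0)).1,
           st.2 ++ [pureW width pixels pal tx ty row]) := by
      simp only [packRowStepA, pureW, c1]
    rw [hstep]
    obtain ⟨i1, i2⟩ := ih (_, st.2 ++ [pureW width pixels pal tx ty row]) c2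
    refine ⟨?_, i2⟩
    rw [i1]
    simp

-- A's tile loop
lemma tileA_spec (width : Int) (pixels : List (Int × Int × Int × Int))
    (pal : List (Int × Int × Int)) (ts : List Int) :
    ∀ (st : PySem.Dict (Int × Int × Int) Int × List Int), CacheOK pal st.1 →
      (ts.foldl (packTileStepA width pixels pal) st).2
        = st.2 ++ ts.flatMap (fun t => (PySem.List.pyRange 0 8).map
            (pureW width pixels pal (PySem.Int.mod t 8) (PySem.Int.floordiv t 8)))
      ∧ CacheOK pal (ts.foldl (packTileStepA width pixels pal) st).1 := by
  induction ts with
  | nil => intro st h; simpa using h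
  | cons t rest ih =>
    intro st h
    simp only [List.foldl_cons]
    obtain ⟨r1, r2⟩ := rowA_spec width pixels pal (PySem.Int.mod t 8) (PySem.Int.floordiv t 8)
      (PySem.List.pyRange 0 8) st h
    have hstep : packTileStepA width pixels pal st t
        = ((PySem.List.pyRange 0 8).foldl
            (packRowStepA width pixels pal (PySem.Int.mod t 8) (PySem.Int.floordiv t 8)) st) := rfl
    rw [hstep]
    obtain ⟨i1, i2⟩ := ih _ r2
    refine ⟨?_, i2⟩
    rw [i1, r1]
    simp [List.flatMap_cons]

-- B's pixel step
lemma pxB_spec (width : Int) (pixels : List (Int × Int × Int × Int))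
    (pal : List (Int × Int × Int)) (py : Int) (pxs : List Int) :
    ∀ (st : PySem.Dict (Int × Int × Int) Int × List Int), CacheOK pal st.1 →
      (pxs.foldl (gridPxStepB width pixels pal py) st).2
        = st.2 ++ pxs.map (idxAt width pixels pal py)
      ∧ CacheOK pal (pxs.foldl (gridPxStepB width pixels pal py) st).1 := by
  induction pxs with
  | nil => intro st h; simpa using h
  | cons px rest ih =>
    intro st h
    have key : ∃ c', gridPxStepB width pixels pal py st px
        = (c', st.2 ++ [idxAt width pixels pal py px]) ∧ CacheOK pal c' := by
      by_cases ha : ((PySem.List.pyGet? pixels (py * width + px)).getD (0, 0, 0, 0)).2.2.2 = 0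
      · exact ⟨st.1, by simp only [gridPxStepB, idxAt, pIdx, ha, ite_true], h⟩
      · by_cases hc : st.1.contains (((PySem.List.pyGet? pixels (py * width + px)).getD (0, 0, 0, 0)).1, ((PySem.List.pyGet? pixels (py * width + px)).getD (0, 0, 0, 0)).2.1, ((PySem.List.pyGet? pixels (py * width + px)).getD (0, 0, 0, 0)).2.2.1) = true
        · have hsome : (st.1.get? (((PySem.List.pyGet? pixels (py * width + px)).getD (0, 0, 0, 0)).1, ((PySem.List.pyGet? pixels (py * width + px)).getD (0, 0, 0, 0)).2.1, ((PySem.List.pyGet? pixels (py * width + px)).getD (0, 0, 0, 0)).2.2.1)).isSome = true := by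
            rw [← PySem.Dict.contains_eq_isSome_get?]; exact hc
          obtain ⟨v, hv⟩ := Option.isSome_iff_exists.mp hsome
          refine ⟨st.1, ?_, h⟩
          simp only [gridPxStepB, idxAt, pIdx, ha, ite_false, hc, ite_true]
          rw [PySem.Dict.getD_eq_get?_getD, hv]
          simp only [Option.getD_some]
          rw [h _ v hv]
        · refine ⟨st.1.insert (((PySem.List.pyGet? pixels (py * width + px)).getD (0, 0, 0, 0)).1, ((PySem.List.pyGet? pixels (py * width + px)).getD (0, 0, 0, 0)).2.1, ((PySem.List.pyGet? pixels (py * width + px)).getD (0, 0, 0, 0)).2.2.1) (nearest ((PySem.List.pyGet? pixels (py * width + px)).getD (0, 0, 0, 0)).1 ((PySem.List.pyGet? pixels (py * width + px)).getD (0, 0, 0, 0)).2.1 ((PySem.List.pyGet? pixels (py * width + px)).getD (0, 0, 0, 0)).2.2.1 pal), ?_, ?_⟩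
          · simp only [gridPxStepB, idxAt, pIdx, ha, ite_false]
            rw [if_neg hc]
            rw [PySem.Dict.getD_insert_self]
          · intro k v hkv
            rw [PySem.Dict.get?_insert] at hkv
            by_cases hk : k = (((PySem.List.pyGet? pixels (py * width + px)).getD (0, 0, 0, 0)).1, ((PySem.List.pyGet? pixels (py * width + px)).getD (0, 0, 0, 0)).2.1, ((PySem.List.pyGet? pixels (py * width + px)).getD (0, 0, 0, 0)).2.2.1)
            · simp only [hk, if_pos] at hkv
              obtain rfl := Option.some.inj hkv
              rw [hk]
            · rw [if_neg hk] at hkv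
              exact h k v hkv
    obtain ⟨c', e1, e2⟩ := key
    simp only [List.foldl_cons, e1]
    obtain ⟨i1, i2⟩ := ih (c', st.2 ++ [idxAt width pixels pal py px]) e2
    refine ⟨?_, i2⟩
    rw [i1]
    simp

-- B's grid loop
lemma gridB_spec (width : Int) (pixels : List (Int × Int × Int × Int))
    (pal : List (Int × Int × Int)) (pys : List Int) :
    ∀ (st : PySem.Dict (Int × Int × Int) Int × List (List Int)), CacheOK pal st.1 →
      (pys.foldl (gridRowStepB width pixels pal) st).2
        = st.2 ++ pys.map (fun py => (PySem.List.pyRange 0 64).map (idxAt width pixels pal py))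
      ∧ CacheOK pal (pys.foldl (gridRowStepB width pixels pal) st).1 := by
  induction pys with
  | nil => intro st h; simpa using h
  | cons py rest ih =>
    intro st h
    simp only [List.foldl_cons]
    obtain ⟨p1, p2⟩ := pxB_spec width pixels pal py (PySem.List.pyRange 0 64) (st.1, []) h
    have hstep : gridRowStepB width pixels pal st py
        = (((PySem.List.pyRange 0 64).foldl (gridPxStepB width pixels pal py) (st.1, [])).1,
           st.2 ++ [(PySem.List.pyRange 0 64).map (idxAt width pixels pal py)]) := by
      simp only [gridRowStepB]
      rw [p1]
      simp
    rw [hstep]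
    obtain ⟨i1, i2⟩ := ih
      (((PySem.List.pyRange 0 64).foldl (gridPxStepB width pixels pal py) (st.1, [])).1,
       st.2 ++ [(PySem.List.pyRange 0 64).map (idxAt width pixels pal py)]) p2
    refine ⟨?_, i2⟩
    rw [i1]
    simp

-- reading B's grid at an in-range (t, row) gives the same pure word as A
lemma wordB_eq_pureW (width : Int) (pixels : List (Int × Int × Int × Int))
    (pal : List (Int × Int × Int)) (n t row : Int)
    (ht0 : 0 ≤ t) (htn : t < 8 * n) (hr0 : 0 ≤ row) (hr8 : row < 8) :
    wordB ((PySem.List.pyRange 0 (8 * n)).map (fun py => (PySem.List.pyRange 0 64).map (idxAt width pixels pal py))) t row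
      = pureW width pixels pal (PySem.Int.mod t 8) (PySem.Int.floordiv t 8) row := by
  have hty_eq : PySem.Int.floordiv t 8 * 8 + PySem.Int.mod t 8 = t := PySem.Int.floordiv_mul_add_mod t 8
  have htx0 : 0 ≤ PySem.Int.mod t 8 := PySem.Int.mod_nonneg t (by norm_num)
  have htx8 : PySem.Int.mod t 8 < 8 := PySem.Int.mod_lt t (by norm_num)
  have hi0 : 0 ≤ PySem.Int.floordiv t 8 * 8 + row := by omega
  have hi1 : PySem.Int.floordiv t 8 * 8 + row < 8 * n := by omega
  simp only [wordB]
  rw [show (PySem.List.pyGet? ((PySem.List.pyRange 0 (8 * n)).map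
        (fun py => (PySem.List.pyRange 0 64).map (idxAt width pixels pal py)))
        (PySem.Int.floordiv t 8 * 8 + row)).getD []
      = (PySem.List.pyRange 0 64).map (idxAt width pixels pal (PySem.Int.floordiv t 8 * 8 + row)) from
    PySem.List.pyGetD_map_pyRange_of_nonneg _ (8 * n) _ [] hi0 hi1]
  simp only [pureW]
  apply PySem.List.foldl_congr_mem
  intro acc col hcol
  obtain ⟨hc0, hc8⟩ := PySem.List.mem_pyRange_one.mp hcol
  rw [show (PySem.List.pyGet? ((PySem.List.pyRange 0 64).map
        (idxAt width pixels pal (PySem.Int.floordiv t 8 * 8 + row)))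
        (PySem.Int.mod t 8 * 8 + col)).getD 0
      = idxAt width pixels pal (PySem.Int.floordiv t 8 * 8 + row) (PySem.Int.mod t 8 * 8 + col) from
    PySem.List.pyGetD_map_pyRange_of_nonneg _ 64 _ 0 (by omega) (by omega)]

lemma cacheOK_empty (pal : List (Int × Int × Int)) : CacheOK pal PySem.Dict.empty := by
  intro k v hkv
  simp [PySem.Dict.get?_empty] at hkv

-- ===== VERDICT (by name: the statement is the Claim_ definition above) =====
theorem pack_tiles_spec : Claim_equal_pack_tiles := by
  unfold Claim_equal_pack_tiles
  intro width height pixels pal _ _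
  simp only [Spec_pack_tiles, pack_tiles, pack_tiles_alt]
  obtain ⟨tA, _⟩ := tileA_spec width pixels pal
    (PySem.List.pyRange 0 (8 * PySem.Int.floordiv height 8)) (PySem.Dict.empty, []) (cacheOK_empty pal)
  obtain ⟨gB, _⟩ := gridB_spec width pixels pal
    (PySem.List.pyRange 0 (8 * PySem.Int.floordiv height 8)) (PySem.Dict.empty, []) (cacheOK_empty pal)
  simp only [List.nil_append] at tA gB
  rw [tA, gB]
  simp only [PySem.List.foldl_append_singleton_eq_map, PySem.List.foldl_append_eq_flatMap,
    List.nil_append]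
  refine Prod.ext ?_ rfl
  apply List.flatMap_congr
  intro t ht
  obtain ⟨ht0, htn⟩ := PySem.List.mem_pyRange_one.mp ht
  apply List.map_congr_left
  intro row hrow
  obtain ⟨hr0, hr8⟩ := PySem.List.mem_pyRange_one.mp hrow
  exact (wordB_eq_pureW width pixels pal (PySem.Int.floordiv height 8) t row ht0 htn hr0 hr8).symm
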